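-- pv_equiv track=rewrite | github.com/nitce/nit-global-2022 | src/2/generator.py | solveOut
-- ===== SOURCE A (Python) =====
-- def solveOut(inputs):
--     (n) = inputs
--
--     s = bin(n)[2:]
--     def check(s):
--         if len(s) < 2:
--             return False
--         if s[:2] != '11':
--             return False
--
--         for i in range(len(s)):
--             if i == 0:
--                 if i+1 < len(s) and s[i] != s[i+1]:
--                     return False
--             elif i == len(s) - 1:
--                 if i-1 >= 0 and s[i] != s[i-1]:
--                     return False
--             else:
--                 if s[i] != s[i-1] and s[i] != s[i+1]:
--                     return False
--         return True
--
--     return 'YES' if check(s) else 'NO'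
-- ===== SOURCE B (Python) =====
-- from itertools import groupby
--
--
-- def solveOut(inputs):
--     (n) = inputs
--     s = bin(n)[2:]
--     runs = [sum(1 for _ in g) for _, g in groupby(s)]
--     return 'YES' if s[:2] == '11' and all(r >= 2 for r in runs) else 'NO'
-- ===== Notes on version B (the rewrite author's own statement) =====
-- stated objective: simpler
-- what changed: Replaces A's per-index left/right neighbour comparisons (with separate first/last/middle branches) by computing the run lengths of equal bits via itertools.groupby and checking s[:2]=='11' plus a single all(run >= 2) pass.
import Mathlib
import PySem

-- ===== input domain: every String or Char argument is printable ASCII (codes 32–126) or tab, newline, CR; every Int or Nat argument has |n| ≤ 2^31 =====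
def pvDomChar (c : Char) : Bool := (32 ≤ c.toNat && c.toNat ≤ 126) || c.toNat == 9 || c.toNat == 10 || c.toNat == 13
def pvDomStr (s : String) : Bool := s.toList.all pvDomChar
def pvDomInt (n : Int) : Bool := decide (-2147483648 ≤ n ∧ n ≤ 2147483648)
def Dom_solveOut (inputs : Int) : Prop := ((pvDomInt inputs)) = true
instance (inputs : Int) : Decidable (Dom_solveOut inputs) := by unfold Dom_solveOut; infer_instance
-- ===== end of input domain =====

-- B replaces A's per-index neighbour comparisons with a run-length decomposition of the
-- binary string plus a single "all runs ≥ 2" check (objective: simpler).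

-- ===== PORT A =====
-- one iteration's test: Python's branch structure for index i (all accesses are guarded
-- in range, so List.getD is exact for s[i], s[i+1], s[i-1])
def pvCondA (s : List Char) (i : Nat) : Bool :=
  if i = 0 then
    !(decide (i + 1 < s.length) && decide (s.getD i ' ' ≠ s.getD (i + 1) ' '))
  else if i = s.length - 1 then
    !(decide (s.getD i ' ' ≠ s.getD (i - 1) ' '))
  else
    !(decide (s.getD i ' ' ≠ s.getD (i - 1) ' ') && decide (s.getD i ' ' ≠ s.getD (i + 1) ' '))

-- 'for i in range(len(s)): … return False …' with early exit, as index recursion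
def pvLoopA (s : List Char) (i : Nat) : Bool :=
  if _h : i < s.length then
    if pvCondA s i then pvLoopA s (i + 1) else false
  else
    true
termination_by s.length - i

-- the nested 'def check(s)'
def pvCheckA (s : List Char) : Bool :=
  if s.length < 2 then false
  else if PySem.List.slice s none (some 2) ≠ ['1', '1'] then false
  else pvLoopA s 0

def solveOut (inputs : Int) : String :=
  let s := PySem.List.slice (PySem.Int.toBinChars0b inputs) (some 2) none  -- bin(n)[2:]
  if pvCheckA s then "YES" else "NO"

-- ===== PORT B =====
-- run lengths of itertools.groupby(s): current group char c, current count k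
def pvRunsAux (c : Char) (k : Nat) : List Char → List Nat
  | [] => [k]
  | x :: t => if x = c then pvRunsAux c (k + 1) t else k :: pvRunsAux x 1 t

def pvRuns : List Char → List Nat
  | [] => []
  | x :: t => pvRunsAux x 1 t

def solveOut_alt (inputs : Int) : String :=
  let s := PySem.List.slice (PySem.Int.toBinChars0b inputs) (some 2) none  -- bin(n)[2:]
  if PySem.List.slice s none (some 2) = ['1', '1'] && (pvRuns s).all (fun r => 2 ≤ r) then
    "YES"
  else
    "NO"

-- ===== PRECONDITION & SPEC =====
def Spec_solveOut (inputs : Int) (out : String) : Prop := out = solveOut_alt inputs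
instance (inputs : Int) (out : String) : Decidable (Spec_solveOut inputs out) := by unfold Spec_solveOut; infer_instance

-- ===== CLAIM (what is proved, stated in full; the proofs are below) =====
def Claim_equal_solveOut : Prop := ∀ (inputs : Int), Dom_solveOut inputs → Spec_solveOut inputs (solveOut inputs)

-- ===== LEMMAS AND PROOFS =====

-- proof-side restatement of A's loop from position i ≥ 1, as a scan that remembers the
-- previous character
def pvTailOK (c : Char) : List Char → Bool
  | [] => true
  | x :: t =>
    if x = c then pvTailOK c t
    else
      match t with
      | [] => false
      | y :: t' => if y = x then pvTailOK x t' else false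

lemma pvTailOK_cons (c x : Char) (t : List Char) :
    pvTailOK c (x :: t)
      = if x = c then pvTailOK c t
        else match t with | [] => false | y :: t' => if y = x then pvTailOK x t' else false := by
  cases t <;> rfl

lemma pvLoopA_eq_tailOK (s : List Char) :
    ∀ i, 1 ≤ i → i ≤ s.length →
      pvLoopA s i = pvTailOK (s.getD (i - 1) ' ') (s.drop i) := by
  suffices h : ∀ m i, 1 ≤ i → i ≤ s.length → s.length - i ≤ m →
      pvLoopA s i = pvTailOK (s.getD (i - 1) ' ') (s.drop i) by
    intro i h1 h2; exact h (s.length - i) i h1 h2 le_rfl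
  intro m
  induction m with
  | zero =>
    intro i h1 h2 hm
    have hi : i = s.length := by omega
    rw [pvLoopA]
    simp [hi, pvTailOK]
  | succ m ih =>
    intro i h1 h2 hm
    by_cases hlt : i < s.length
    · have hio : i - 1 < s.length := by omega
      have hd : s.drop i = s[i] :: s.drop (i + 1) := List.drop_eq_getElem_cons hlt
      have hih := ih (i + 1) (by omega) (by omega) (by omega)
      have hprev : s.getD (i - 1) ' ' = s[i - 1] := List.getD_eq_getElem s ' ' hio
      have hcur : s.getD i ' ' = s[i] := List.getD_eq_getElem s ' ' hlt
      have hip : i + 1 - 1 = i := by omega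
      have hne0 : ¬ i = 0 := by omega
      rw [pvLoopA, dif_pos hlt, hd, hprev, pvTailOK_cons]
      by_cases heqp : s[i] = s[i - 1]'hio
      · -- current equals previous: the iteration passes, both sides recurse
        have hcond : pvCondA s i = true := by
          unfold pvCondA
          rw [if_neg hne0, hcur, hprev]
          by_cases hl : i = s.length - 1
          · rw [if_pos hl]; simp [heqp]
          · rw [if_neg hl]; simp [heqp]
        rw [hcond, if_pos rfl, if_pos heqp, hih, hip, hcur, ← heqp]
      · -- current differs from previous
        rw [if_neg heqp]
        by_cases hlast : i = s.length - 1
        · -- last position: A's test fails, and the scan has no next character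
          have hcond : pvCondA s i = false := by
            unfold pvCondA
            rw [if_neg hne0, if_pos hlast, hcur, hprev]
            simp [heqp]
          have hnil : s.drop (i + 1) = [] := by
            apply List.drop_eq_nil_of_le; omega
          rw [hcond, hnil]
          simp
        · -- middle position: A's test reduces to s[i] = s[i+1]
          have hlt1 : i + 1 < s.length := by omega
          have hd1 : s.drop (i + 1) = s[i + 1] :: s.drop (i + 2) := List.drop_eq_getElem_cons hlt1
          have hnext : s.getD (i + 1) ' ' = s[i + 1] := List.getD_eq_getElem s ' ' hlt1
          have hcond : pvCondA s i = decide (s[i] = s[i + 1]) := by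
            unfold pvCondA
            rw [if_neg hne0, if_neg hlast, hcur, hprev, hnext]
            simp [heqp]
          rw [hcond, hd1]
          show (if decide (s[i]'hlt = s[i + 1]'hlt1) = true then pvLoopA s (i + 1) else false)
              = if s[i + 1]'hlt1 = s[i]'hlt then pvTailOK (s[i]'hlt) (s.drop (i + 2)) else false
          by_cases hnx : s[i + 1]'hlt1 = s[i]'hlt
          · rw [if_pos hnx, decide_eq_true (hnx.symm), if_pos rfl, hih, hip, hcur, hd1,
              pvTailOK_cons, if_pos hnx]
          · have hxn : ¬ s[i] = s[i + 1] := fun h => hnx h.symm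
            rw [if_neg hnx, decide_eq_false hxn]
            simp
    · have hi : i = s.length := by omega
      rw [pvLoopA]
      simp [hi, pvTailOK]

lemma pvTailOK_eq_runsAux (c : Char) (t : List Char) :
    ∀ k, 2 ≤ k → pvTailOK c t = (pvRunsAux c k t).all (fun r => 2 ≤ r) := by
  suffices h : ∀ m (t : List Char), t.length ≤ m → ∀ (c : Char) k, 2 ≤ k →
      pvTailOK c t = (pvRunsAux c k t).all (fun r => 2 ≤ r) by
    intro k hk; exact h t.length t le_rfl c k hk
  intro m
  induction m with
  | zero =>
    intro t ht c k hk
    have : t = [] := List.eq_nil_of_length_eq_zero (by omega)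
    subst this
    simp [pvTailOK, pvRunsAux, hk]
  | succ m ih =>
    intro t ht c k hk
    match t with
    | [] => simp [pvTailOK, pvRunsAux, hk]
    | x :: t =>
      by_cases hxc : x = c
      · rw [pvTailOK_cons, if_pos hxc, pvRunsAux, if_pos hxc]
        exact ih t (by simpa using Nat.le_of_succ_le_succ ht) c (k + 1) (by omega)
      · rw [pvTailOK_cons, if_neg hxc, pvRunsAux, if_neg hxc]
        match t with
        | [] => simp [pvRunsAux]
        | y :: t =>
          by_cases hyx : y = x
          · rw [pvRunsAux, if_pos hyx]
            simp only [List.all_cons, hk, decide_true, Bool.true_and]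
            simp only [if_pos hyx]
            exact ih t (by simp at ht; omega) x 2 le_rfl
          · rw [pvRunsAux, if_neg hyx]
            simp [hyx, hk]

lemma pvCheck_eq (s : List Char) :
    pvCheckA s
      = (PySem.List.slice s none (some 2) = ['1', '1'] && (pvRuns s).all (fun r => 2 ≤ r)) := by
  have hsl : PySem.List.slice s none (some 2) = s.take 2 := by
    simpa using PySem.List.slice_to s (b := 2) (by norm_num)
  unfold pvCheckA
  rw [hsl]
  by_cases hlen : s.length < 2
  · have hne : s.take 2 ≠ ['1', '1'] := by
      intro h
      have := congrArg List.length h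
      simp [List.length_take] at this
      omega
    simp [hlen, hne]
  · simp only [if_neg hlen]
    by_cases hpre : s.take 2 = ['1', '1']
    · -- s starts with "11": the loop's first iteration passes, then the invariant applies
      match s, hlen, hpre with
      | a :: b :: t, hlen, hpre =>
        have ha : a = '1' := by simpa using congrArg (fun l => l.headD ' ') hpre
        have hb : b = '1' := by simpa using congrArg (fun l => l.getD 1 ' ') hpre
        subst ha hb
        simp only [hpre, ne_eq, not_true_eq_false, if_false]
        have hcond : pvCondA ('1' :: '1' :: t) 0 = true := by
          unfold pvCondA; simp
        have h0 : pvLoopA ('1' :: '1' :: t) 0 = pvLoopA ('1' :: '1' :: t) 1 := by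
          rw [pvLoopA]; simp [hcond]
        rw [h0, pvLoopA_eq_tailOK ('1' :: '1' :: t) 1 le_rfl (by simp)]
        simp only [List.drop_one, List.tail_cons]
        rw [show (('1' :: '1' :: t).getD (1 - 1) ' ') = '1' from rfl, pvTailOK_cons, if_pos rfl]
        show pvTailOK '1' t = (pvRuns ('1' :: '1' :: t)).all (fun r => 2 ≤ r)
        rw [pvRuns, pvRunsAux, if_pos rfl]
        exact pvTailOK_eq_runsAux '1' t 2 le_rfl
    · simp [hpre]

-- ===== VERDICT (by name: the statement is the Claim_ definition above) =====
theorem solveOut_spec : Claim_equal_solveOut := by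
  intro n _
  unfold Spec_solveOut solveOut solveOut_alt
  simp only [pvCheck_eq]
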